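-- pv_equiv track=rewrite | github.com/songhee-lee/2023-python-coding-test | 기출문제/2022 KAKAO BLIND RECRUITMENT/songhee/04. 양궁대회.py | solution
-- ===== SOURCE A (Python) =====
-- def solution(n, info):
--     answer = [0] * 11
--     arr = [0] * 11      # 라이언이 쏜 화살 개수
--     maxDiff = 0
--
--     # 1이면 피치+1 개로 점수 획득한다고 할 때,
--     # 000..0 ~ 111..1 까지 확인
--     for subset in range(1, 1 << 10):
--         ryan, peach = 0, 0  # 라이언, 피치 점수
--         cnt = 0             # 과녁에 쏜 화살 개수
--
--         for i in range(10):
--             # 라이언이 점수를 획득한다면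
--             if subset & (1 << i):
--                 ryan += 10-i
--                 arr[i] = info[i]+1
--                 cnt += arr[i]
--             # 아니라면
--             else:
--                 arr[i] = 0
--                 if info[i]:     # 피치가 화살 쏜 경우
--                     peach += 10-i
--
--         if cnt > n : continue   # 화살을 더 많이 날린 경우
--         arr[10] = n - cnt       # 남은 화살 있으면 0점에 넣기
--
--         # 점수 차이가 많이 나는 화살셋으로 변경
--         if ryan - peach > maxDiff:
--             maxDiff = ryan - peach
--             answer = arr[:]
--         # 점수 차 같다면 가장 낮은 점수를 많이 맞춘 경우인지 확인
--         elif ryan - peach == maxDiff: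
--             for j in reversed(range(11)):
--                 if arr[j] > answer[j]:
--                     maxDiff = ryan-peach
--                     answer = arr[:]
--                     break
--                 elif arr[j] < answer[j]:
--                     break
--
--     # 라이언이 이기는 경우가 없는 경우
--     if maxDiff == 0:
--         answer = [-1]
--
--     return answer
-- ===== SOURCE B (Python) =====
-- def solution(n, info):
--     # Recursive DFS over zones 9..0: at each zone Ryan either takes it (info[z]+1
--     # arrows) or skips it; the best candidate is kept via a (diff, reversed-arr)
--     # tuple comparison, which is exactly the reverse-index tie-break.
--     def dfs(z, tail, ryan, peach, cnt, best):
--         if z < 0: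
--             arr = tail + [n - cnt]
--             d = ryan - peach
--             if cnt <= n and (d, arr[::-1]) > (best[0], best[1][::-1]):
--                 return (d, arr)
--             return best
--         s = 10 - z
--         best = dfs(z - 1, [0] + tail, ryan, peach + (s if info[z] else 0), cnt, best)
--         best = dfs(z - 1, [info[z] + 1] + tail, ryan + s, peach, cnt + info[z] + 1, best)
--         return best
--     d, arr = dfs(9, [], 0, 0, 0, (0, [0] * 11))
--     return arr if d > 0 else [-1]
-- ===== Notes on version B (the rewrite author's own statement) =====
-- stated objective: alternative
-- what changed: Replaced the 2^10 bitmask loop with manual index assignments and a hand-written reversed-index tie-break scan by a recursive DFS over zones 9..0 that builds the arrow list by prepending and keeps the best candidate via a (diff, reversed-list) tuple comparison.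
import Mathlib
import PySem

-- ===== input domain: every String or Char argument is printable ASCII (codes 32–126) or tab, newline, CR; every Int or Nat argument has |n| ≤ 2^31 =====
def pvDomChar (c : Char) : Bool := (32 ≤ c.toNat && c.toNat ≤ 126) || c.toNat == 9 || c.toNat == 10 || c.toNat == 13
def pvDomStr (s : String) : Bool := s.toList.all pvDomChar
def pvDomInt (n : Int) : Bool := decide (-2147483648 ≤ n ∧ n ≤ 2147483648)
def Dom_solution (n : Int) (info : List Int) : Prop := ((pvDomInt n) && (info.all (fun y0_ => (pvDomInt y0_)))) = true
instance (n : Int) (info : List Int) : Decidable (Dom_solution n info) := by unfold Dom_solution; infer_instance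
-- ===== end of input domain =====

-- B replaces A's 2^10 bitmask loop (index assignments + hand-written reverse-index
-- tie-break scan) by a recursive DFS over zones with a (diff, reversed-list) tuple
-- comparison; same cost, different decomposition ("alternative").

-- ===== PORT A =====
-- A's inner tie-break loop 'for j in reversed(range(11)): …' with break; fuel k+1 looks at index j = k.
-- All indices read/written below are always in range (arr/answer have length 11, i ∈ 0..9), so the
-- total forms pyGetD / pySetD are exact.
def tieA (arr answer : List Int) (diff m : Int) : Nat → List Int × Int
  | 0 => (answer, m)
  | k+1 =>
    if PySem.List.pyGetD arr (k : Int) 0 > PySem.List.pyGetD answer (k : Int) 0 then (arr, diff)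
    else if PySem.List.pyGetD arr (k : Int) 0 < PySem.List.pyGetD answer (k : Int) 0 then (answer, m)
    else tieA arr answer diff m k

-- one iteration of A's outer 'for subset in range(1, 1 << 10)' loop; state (answer, arr, maxDiff)
def bodyA (n : Int) (info : List Int) (st : List Int × List Int × Int) (subset : Int) : List Int × List Int × Int :=
  let t := (PySem.List.pyRange 0 10 1).foldl (fun (t : Int × Int × Int × List Int) i =>
      -- Python 'subset & (1 << i)' (PySem.Int.band is Python-exact &; i ≥ 0 here so 1 << i is 1 <<< i.toNat)
      if PySem.Int.band subset ((1 : Int) <<< i.toNat) ≠ 0 then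
        let arr := PySem.List.pySetD t.2.2.2 i (PySem.List.pyGetD info i 0 + 1)
        (t.1 + (10 - i), t.2.1, t.2.2.1 + PySem.List.pyGetD arr i 0, arr)
      else
        let arr := PySem.List.pySetD t.2.2.2 i 0
        if PySem.List.pyGetD info i 0 ≠ 0 then (t.1, t.2.1 + (10 - i), t.2.2.1, arr)
        else (t.1, t.2.1, t.2.2.1, arr))
    (0, 0, 0, st.2.1)
  if t.2.2.1 > n then (st.1, t.2.2.2, st.2.2)    -- 'if cnt > n: continue'
  else
    let arr := PySem.List.pySetD t.2.2.2 (10 : Int) (n - t.2.2.1)   -- arr[10] = n - cnt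
    if t.1 - t.2.1 > st.2.2 then (arr, arr, t.1 - t.2.1)
    else if t.1 - t.2.1 = st.2.2 then
      let r := tieA arr st.1 (t.1 - t.2.1) st.2.2 11
      (r.1, arr, r.2)
    else (st.1, arr, st.2.2)

def solution (n : Int) (info : List Int) : List Int :=
  -- range(1, 1 << 10): 1 << 10 = 1024
  let st := (PySem.List.pyRange 1 1024 1).foldl (bodyA n info)
              (List.replicate 11 0, List.replicate 11 0, 0)
  if st.2.2 = 0 then [-1] else st.1

-- ===== PORT B =====
-- Python list comparison l1 > l2 (lexicographic)
def listGt : List Int → List Int → Bool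
  | [], _ => false
  | _ :: _, [] => true
  | a :: as, b :: bs => a > b || (a == b && listGt as bs)

-- Python tuple comparison (d1, l1) > (d2, l2)
def pairGt (x y : Int × List Int) : Bool := x.1 > y.1 || (x.1 == y.1 && listGt x.2 y.2)

-- Source B's dfs; Lean fuel z+1 is Python zone z (leaf when z < 0 is fuel 0); info[z] read via the
-- total pyGetD (z ∈ 0..9 is in range under Pre_).
def dfsB (n : Int) (info : List Int) : Nat → List Int → Int → Int → Int → Int × List Int → Int × List Int
  | 0, tail, ryan, peach, cnt, best =>
      let arr := tail ++ [n - cnt]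
      let d := ryan - peach
      if cnt ≤ n ∧ pairGt (d, arr.reverse) (best.1, best.2.reverse) = true then (d, arr) else best
  | z+1, tail, ryan, peach, cnt, best =>
      let s : Int := 10 - (z : Int)
      let e := PySem.List.pyGetD info (z : Int) 0
      let best1 := dfsB n info z (0 :: tail) ryan (peach + (if e ≠ 0 then s else 0)) cnt best
      dfsB n info z ((e + 1) :: tail) (ryan + s) peach (cnt + e + 1) best1

def solution_alt (n : Int) (info : List Int) : List Int :=
  let r := dfsB n info 10 [] 0 0 0 (0, List.replicate 11 0)
  if r.1 > 0 then r.2 else [-1]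

-- ===== PRECONDITION & SPEC =====
-- A reads info[0]..info[9] and raises IndexError on shorter lists; nothing else can raise.
def Pre_solution (n : Int) (info : List Int) : Prop := 10 ≤ info.length
instance (n : Int) (info : List Int) : Decidable (Pre_solution n info) := by unfold Pre_solution; infer_instance
def pvWitness_solution : Int × List Int := (5, [2, 1, 1, 1, 0, 0, 0, 0, 0, 0])

def Spec_solution (n : Int) (info : List Int) (out : List Int) : Prop := out = solution_alt n info
instance (n : Int) (info : List Int) (out : List Int) : Decidable (Spec_solution n info out) := by unfold Spec_solution; infer_instance

-- ===== CLAIM (what is proved, stated in full; the proofs are below) =====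
def Claim_equal_solution : Prop := ∀ (n : Int) (info : List Int), Dom_solution n info → Pre_solution n info → Spec_solution n info (solution n info)

-- ===== LEMMAS AND PROOFS =====

-- Decoding a subset j < 2^10 zone by zone: entry, ryan, peach, cnt accumulated over zones 0..k-1.
def entB (info : List Int) (k j : Nat) : Int :=
  if j.testBit k then PySem.List.pyGetD info (k : Int) 0 + 1 else 0

def tbF (info : List Int) : Nat → Nat → List Int
  | 0, _ => []
  | k+1, j => tbF info k j ++ [entB info k j]

def rbF : Nat → Nat → Int
  | 0, _ => 0
  | k+1, j => rbF k j + (if j.testBit k then 10 - (k : Int) else 0)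

def pbF (info : List Int) : Nat → Nat → Int
  | 0, _ => 0
  | k+1, j => pbF info k j + (if ¬ j.testBit k ∧ PySem.List.pyGetD info (k : Int) 0 ≠ 0 then 10 - (k : Int) else 0)

def cbF (info : List Int) : Nat → Nat → Int
  | 0, _ => 0
  | k+1, j => cbF info k j + (if j.testBit k then PySem.List.pyGetD info (k : Int) 0 + 1 else 0)

-- B's leaf applied to the fully decoded subset j
def uB (n : Int) (info : List Int) (best : Int × List Int) (j : Nat) : Int × List Int :=
  dfsB n info 0 (tbF info 10 j) (rbF 10 j) (pbF info 10 j) (cbF info 10 j) best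

theorem length_tbF (info : List Int) (k j : Nat) : (tbF info k j).length = k := by
  induction k with
  | zero => rfl
  | succ k ih => simp [tbF, ih]

theorem F_congr (info : List Int) : ∀ (k : Nat) (a b : Nat),
    (∀ z, z < k → a.testBit z = b.testBit z) →
    tbF info k a = tbF info k b ∧ rbF k a = rbF k b ∧ pbF info k a = pbF info k b ∧ cbF info k a = cbF info k b := by
  intro k
  induction k with
  | zero => intro a b _; exact ⟨rfl, rfl, rfl, rfl⟩
  | succ k ih =>
    intro a b h
    obtain ⟨h1, h2, h3, h4⟩ := ih a b (fun z hz => h z (by omega))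
    have hk : a.testBit k = b.testBit k := h k (by omega)
    refine ⟨?_, ?_, ?_, ?_⟩ <;> simp [tbF, rbF, pbF, cbF, entB, h1, h2, h3, h4, hk]

theorem rbF_zero : ∀ k, rbF k 0 = 0 := by
  intro k; induction k with
  | zero => rfl
  | succ k ih => simp [rbF, ih]

theorem pbF_nonneg (info : List Int) : ∀ (k : Nat) (j : Nat), k ≤ 10 → 0 ≤ pbF info k j := by
  intro k
  induction k with
  | zero => intro j _; simp [pbF]
  | succ k ih =>
    intro j h
    have := ih j (by omega)
    have h10 : (0:Int) ≤ 10 - (k : Int) := by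
      have : (k : Int) ≤ 9 := by exact_mod_cast Int.ofNat_le.mpr (by omega : k ≤ 9)
      omega
    simp only [pbF]
    split <;> omega

-- Python comparison helpers, spelled out
theorem pairGt_lt {d e : Int} (l1 l2 : List Int) (h : d < e) : pairGt (d, l1) (e, l2) = false := by
  have h1 : decide (d > e) = false := by simp; omega
  have h2 : (d == e) = false := by simp; omega
  simp [pairGt, h1, h2]

theorem pairGt_gt {d e : Int} (l1 l2 : List Int) (h : e < d) : pairGt (d, l1) (e, l2) = true := by
  have h1 : decide (d > e) = true := by simp; omega
  simp [pairGt, h1]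

theorem pairGt_eq {d : Int} (l1 l2 : List Int) : pairGt (d, l1) (d, l2) = listGt l1 l2 := by
  simp [pairGt]

theorem pairGt_true_ge {d e : Int} {l1 l2 : List Int} (h : pairGt (d, l1) (e, l2) = true) : e ≤ d := by
  by_contra hlt
  rw [pairGt_lt l1 l2 (by omega)] at h
  cases h

-- the bit test A performs, in terms of Nat.testBit
theorem band_shl (s : Int) (hs : 0 ≤ s) (k : Nat) :
    (PySem.Int.band s ((1 : Int) <<< ((k : Nat) : Int)) ≠ 0) ↔ s.toNat.testBit k = true := by
  rw [Int.one_shiftLeft, PySem.Int.band_of_nonneg hs (by positivity), Int.toNat_natCast,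
    Nat.and_two_pow]
  cases h : s.toNat.testBit k
  · simp
  · simp

-- ===== B side: unrolling the DFS into a fold over all subsets =====
theorem dfs_unroll (n : Int) (info : List Int) : ∀ (k : Nat) (tail : List Int) (r p c : Int) (best : Int × List Int),
    dfsB n info k tail r p c best =
      (List.range (2 ^ k)).foldl
        (fun b j => dfsB n info 0 (tbF info k j ++ tail) (r + rbF k j) (p + pbF info k j) (c + cbF info k j) b) best := by
  intro k
  induction k with
  | zero =>
    intro tail r p c best
    rw [pow_zero, List.range_one, List.foldl_cons, List.foldl_nil]
    simp [tbF, rbF, pbF, cbF]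
  | succ k ih =>
    intro tail r p c best
    have hsplit : List.range (2 ^ (k+1)) = List.range (2 ^ k) ++ (List.range (2 ^ k)).map (2 ^ k + ·) := by
      rw [pow_succ, mul_two, List.range_add]
    rw [hsplit, List.foldl_append, List.foldl_map]
    show dfsB n info k _ _ _ _ (dfsB n info k (0 :: tail) r (p + _) c best) = _
    rw [ih, ih]
    have congr1 : ∀ (b : Int × List Int), ∀ j ∈ List.range (2 ^ k),
        dfsB n info 0 (tbF info k j ++ 0 :: tail) (r + rbF k j)
          ((p + (if PySem.List.pyGetD info ((k : Nat) : Int) 0 ≠ 0 then 10 - (k : Int) else 0)) + pbF info k j)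
          (c + cbF info k j) b
        = dfsB n info 0 (tbF info (k+1) j ++ tail) (r + rbF (k+1) j) (p + pbF info (k+1) j) (c + cbF info (k+1) j) b := by
      intro b j hj
      have hbit : j.testBit k = false := Nat.testBit_lt_two_pow (List.mem_range.mp hj)
      rw [show tbF info (k+1) j ++ tail = tbF info k j ++ 0 :: tail by simp [tbF, entB, hbit],
        show rbF (k+1) j = rbF k j by simp [rbF, hbit],
        show p + pbF info (k+1) j
            = (p + (if PySem.List.pyGetD info ((k : Nat) : Int) 0 ≠ 0 then 10 - (k : Int) else 0)) + pbF info k j by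
          simp [pbF, hbit]; ring,
        show cbF info (k+1) j = cbF info k j by simp [cbF, hbit]]
    have congr2 : ∀ (b : Int × List Int), ∀ j ∈ List.range (2 ^ k),
        dfsB n info 0 (tbF info k j ++ (PySem.List.pyGetD info ((k : Nat) : Int) 0 + 1) :: tail)
          ((r + (10 - (k : Int))) + rbF k j) (p + pbF info k j)
          ((c + PySem.List.pyGetD info ((k : Nat) : Int) 0 + 1) + cbF info k j) b
        = dfsB n info 0 (tbF info (k+1) (2 ^ k + j) ++ tail) (r + rbF (k+1) (2 ^ k + j))
            (p + pbF info (k+1) (2 ^ k + j)) (c + cbF info (k+1) (2 ^ k + j)) b := by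
      intro b j hj
      have hlt : j < 2 ^ k := List.mem_range.mp hj
      have hbitj : j.testBit k = false := Nat.testBit_lt_two_pow hlt
      have hbit : (2 ^ k + j).testBit k = true := by
        rw [Nat.testBit_two_pow_add_eq, hbitj]; rfl
      obtain ⟨e1, e2, e3, e4⟩ := F_congr info k (2 ^ k + j) j
        (fun z hz => Nat.testBit_two_pow_add_gt hz j)
      rw [show tbF info (k+1) (2 ^ k + j) ++ tail
            = tbF info k j ++ (PySem.List.pyGetD info ((k : Nat) : Int) 0 + 1) :: tail by
          simp [tbF, entB, hbit, e1],
        show r + rbF (k+1) (2 ^ k + j) = (r + (10 - (k : Int))) + rbF k j by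
          simp [rbF, hbit, e2]; ring,
        show p + pbF info (k+1) (2 ^ k + j) = p + pbF info k j by
          simp [pbF, hbit, e3],
        show c + cbF info (k+1) (2 ^ k + j) = (c + PySem.List.pyGetD info ((k : Nat) : Int) 0 + 1) + cbF info k j by
          simp [cbF, hbit, e4]; ring]
    rw [PySem.List.foldl_congr_mem (List.range (2 ^ k)) _ _ best congr1]
    exact PySem.List.foldl_congr_mem (List.range (2 ^ k)) _ _ _ congr2

-- ===== A side: the inner for-i loop computes the decoded subset =====
theorem innerA (n : Int) (info : List Int) (s : Int) (hs : 0 ≤ s) :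
    ∀ (m k : Nat), k + m = 10 → ∀ (arr0 : List Int), arr0.length = 11 →
    (PySem.List.pyRange (k : Int) 10 1).foldl (fun (t : Int × Int × Int × List Int) i =>
      if PySem.Int.band s ((1 : Int) <<< i.toNat) ≠ 0 then
        let arr := PySem.List.pySetD t.2.2.2 i (PySem.List.pyGetD info i 0 + 1)
        (t.1 + (10 - i), t.2.1, t.2.2.1 + PySem.List.pyGetD arr i 0, arr)
      else
        let arr := PySem.List.pySetD t.2.2.2 i 0
        if PySem.List.pyGetD info i 0 ≠ 0 then (t.1, t.2.1 + (10 - i), t.2.2.1, arr)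
        else (t.1, t.2.1, t.2.2.1, arr))
      (rbF k s.toNat, pbF info k s.toNat, cbF info k s.toNat, tbF info k s.toNat ++ arr0.drop k)
    = (rbF 10 s.toNat, pbF info 10 s.toNat, cbF info 10 s.toNat, tbF info 10 s.toNat ++ arr0.drop 10) := by
  intro m
  induction m with
  | zero =>
    intro k hk arr0 _
    have : k = 10 := by omega
    subst this
    rw [PySem.List.pyRange_one_eq_nil (by norm_num)]
    rfl
  | succ m ih =>
    intro k hk arr0 h0
    have hklt : k < 10 := by omega
    have hkI : ((k : Nat) : Int) < 10 := by exact_mod_cast hklt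
    rw [PySem.List.pyRange_one_cons hkI, List.foldl_cons]
    have harr : ((k : Nat) : Int) + 1 = ((k + 1 : Nat) : Int) := by push_cast; ring
    have hdk : k < arr0.length := by omega
    have hdrop : arr0.drop k = arr0[k] :: arr0.drop (k+1) := List.drop_eq_getElem_cons hdk
    have hlen : (tbF info k s.toNat).length = k := length_tbF info k s.toNat
    have hset : ∀ v : Int, PySem.List.pySetD (tbF info k s.toNat ++ arr0.drop k) ((k : Nat) : Int) v
        = tbF info k s.toNat ++ v :: arr0.drop (k+1) := by
      intro v
      rw [PySem.List.pySetD_natCast, hdrop]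
      simp [hlen]
      rw [hdrop, List.set_cons_zero]
    have hget : ∀ (v : Int) (rest : List Int),
        PySem.List.pyGetD (tbF info k s.toNat ++ v :: rest) ((k : Nat) : Int) 0 = v := by
      intro v rest
      rw [PySem.List.pyGetD_natCast]
      simp [hlen]
    rw [show (((k : Nat) : Int)).toNat = k from Int.toNat_natCast k]
    by_cases hbit : s.toNat.testBit k = true
    · rw [if_pos ((band_shl s hs k).mpr hbit), hset]
      dsimp only
      rw [hget]
      rw [show rbF k s.toNat + (10 - ((k : Nat) : Int)) = rbF (k+1) s.toNat by simp [rbF, hbit],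
        show cbF info k s.toNat + (PySem.List.pyGetD info ((k : Nat) : Int) 0 + 1) = cbF info (k+1) s.toNat by
          simp [cbF, hbit],
        show tbF info k s.toNat ++ (PySem.List.pyGetD info ((k : Nat) : Int) 0 + 1) :: arr0.drop (k+1)
            = tbF info (k+1) s.toNat ++ arr0.drop (k+1) by simp [tbF, entB, hbit],
        show pbF info k s.toNat = pbF info (k+1) s.toNat by simp [pbF, hbit]]
      rw [harr]
      exact ih (k+1) (by omega) arr0 h0
    · have hbitf : s.toNat.testBit k = false := by simpa using hbit
      rw [if_neg (fun hh => hbit ((band_shl s hs k).mp hh)), hset]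
      dsimp only
      by_cases hinf : PySem.List.pyGetD info ((k : Nat) : Int) 0 ≠ 0
      · have hinf' : info[k]?.getD 0 ≠ 0 := by simpa using hinf
        rw [if_pos hinf]
        rw [show pbF info k s.toNat + (10 - ((k : Nat) : Int)) = pbF info (k+1) s.toNat by
            simp [pbF, hbitf, hinf'],
          show rbF k s.toNat = rbF (k+1) s.toNat by simp [rbF, hbitf],
          show cbF info k s.toNat = cbF info (k+1) s.toNat by simp [cbF, hbitf],
          show tbF info k s.toNat ++ (0 : Int) :: arr0.drop (k+1)
              = tbF info (k+1) s.toNat ++ arr0.drop (k+1) by simp [tbF, entB, hbitf]]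
        rw [harr]
        exact ih (k+1) (by omega) arr0 h0
      · have hinf0 : info[k]?.getD 0 = 0 := by simpa using hinf
        rw [if_neg hinf]
        rw [show rbF k s.toNat = rbF (k+1) s.toNat by simp [rbF, hbitf],
          show pbF info k s.toNat = pbF info (k+1) s.toNat by simp [pbF, hbitf, hinf0],
          show cbF info k s.toNat = cbF info (k+1) s.toNat by simp [cbF, hbitf],
          show tbF info k s.toNat ++ (0 : Int) :: arr0.drop (k+1)
              = tbF info (k+1) s.toNat ++ arr0.drop (k+1) by simp [tbF, entB, hbitf]]
        rw [harr]
        exact ih (k+1) (by omega) arr0 h0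

-- ===== the tie-break scan is reverse-lexicographic comparison =====
theorem tie_take (d m : Int) : ∀ (k : Nat) (arr ans : List Int), k ≤ arr.length → k ≤ ans.length →
    tieA arr ans d m k = if listGt (arr.take k).reverse (ans.take k).reverse = true then (arr, d) else (ans, m) := by
  intro k
  induction k with
  | zero => intro arr ans _ _; simp [tieA, listGt]
  | succ k ih =>
    intro arr ans h1 h2
    have h1' : k < arr.length := by omega
    have h2' : k < ans.length := by omega
    have e1 : (arr.take (k+1)).reverse = arr[k] :: (arr.take k).reverse := by
      rw [List.take_succ_eq_append_getElem h1']; simp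
    have e2 : (ans.take (k+1)).reverse = ans[k] :: (ans.take k).reverse := by
      rw [List.take_succ_eq_append_getElem h2']; simp
    have g1 : PySem.List.pyGetD arr (k : Int) 0 = arr[k] := by
      rw [PySem.List.pyGetD_natCast]; exact List.getD_eq_getElem arr 0 h1'
    have g2 : PySem.List.pyGetD ans (k : Int) 0 = ans[k] := by
      rw [PySem.List.pyGetD_natCast]; exact List.getD_eq_getElem ans 0 h2'
    rw [e1, e2, show tieA arr ans d m (k+1)
        = if PySem.List.pyGetD arr (k : Int) 0 > PySem.List.pyGetD ans (k : Int) 0 then (arr, d)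
          else if PySem.List.pyGetD arr (k : Int) 0 < PySem.List.pyGetD ans (k : Int) 0 then (ans, m)
          else tieA arr ans d m k from rfl, g1, g2]
    rcases lt_trichotomy arr[k] ans[k] with hlt | heq | hgt
    · rw [if_neg (by omega), if_pos hlt,
        if_neg (by simp [listGt]; omega)]
    · rw [if_neg (by omega), if_neg (by omega), ih arr ans (by omega) (by omega)]
      have : listGt (arr[k] :: (arr.take k).reverse) (ans[k] :: (ans.take k).reverse)
          = listGt (arr.take k).reverse (ans.take k).reverse := by
        simp [listGt, heq]
      rw [this]
    · rw [if_pos hgt, if_pos (by simp [listGt, hgt])]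

theorem uB_len (n : Int) (info : List Int) (b : Int × List Int) (j : Nat) (hb : b.2.length = 11) :
    (uB n info b j).2.length = 11 := by
  unfold uB
  simp only [dfsB]
  split
  · simp [length_tbF]
  · exact hb

-- one outer iteration of A equals B's leaf on the decoded subset (plus a length-11 scratch arr)
theorem bodyA_char (n : Int) (info : List Int) (s : Int) (hs : 0 ≤ s)
    (ans arr : List Int) (m : Int) (ha : ans.length = 11) (hr : arr.length = 11) :
    (bodyA n info (ans, arr, m) s).1 = (uB n info (m, ans) s.toNat).2 ∧
    (bodyA n info (ans, arr, m) s).2.2 = (uB n info (m, ans) s.toNat).1 ∧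
    (bodyA n info (ans, arr, m) s).2.1.length = 11 := by
  have hinner := innerA n info s hs 10 0 rfl arr hr
  have hinit : ((rbF 0 s.toNat, pbF info 0 s.toNat, cbF info 0 s.toNat,
      tbF info 0 s.toNat ++ arr.drop 0) : Int × Int × Int × List Int) = (0, 0, 0, arr) := by
    simp [rbF, pbF, cbF, tbF]
  rw [hinit, show ((0 : Nat) : Int) = (0 : Int) from rfl] at hinner
  unfold bodyA
  rw [hinner]
  dsimp only
  set j := s.toNat with hj
  set r := rbF 10 j with hrj
  set p := pbF info 10 j with hpj
  set c := cbF info 10 j with hcj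
  have hdrop : arr.drop 10 = arr[10] :: arr.drop 11 := List.drop_eq_getElem_cons (by omega)
  have hdrop11 : arr.drop 11 = [] := List.drop_eq_nil_of_le (by omega)
  have hlent : (tbF info 10 j).length = 10 := length_tbF info 10 j
  have harrI : (tbF info 10 j ++ arr.drop 10).length = 11 := by
    simp [hlent, hr]
  have hset : PySem.List.pySetD (tbF info 10 j ++ arr.drop 10) (10 : Int) (n - c)
      = tbF info 10 j ++ [n - c] := by
    rw [show (10 : Int) = ((10 : Nat) : Int) from rfl, PySem.List.pySetD_natCast, hdrop, hdrop11]
    simp [hlent]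
  unfold uB
  simp only [dfsB]
  rw [← hrj, ← hpj, ← hcj]
  by_cases hc : c > n
  · rw [if_pos hc, if_neg (by intro hh; omega)]
    exact ⟨rfl, rfl, harrI⟩
  · rw [if_neg hc, hset]
    have hcle : c ≤ n := by omega
    have harrF : (tbF info 10 j ++ [n - c]).length = 11 := by simp [hlent]
    rcases lt_trichotomy (r - p) m with hlt | heq | hgt
    · rw [if_neg (by omega), if_neg (by omega),
        if_neg (by
          intro hh
          rw [pairGt_lt _ _ hlt] at hh
          cases hh.2)]
      exact ⟨rfl, rfl, harrF⟩
    · rw [if_neg (by omega), if_pos heq]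
      have htie := tie_take (r - p) m 11 (tbF info 10 j ++ [n - c]) ans (by omega) (by omega)
      rw [List.take_of_length_le (by omega), List.take_of_length_le (by omega)] at htie
      by_cases hg : listGt (tbF info 10 j ++ [n - c]).reverse ans.reverse = true
      · rw [htie, if_pos hg, if_pos ⟨hcle, by rw [heq, pairGt_eq]; exact hg⟩]
        exact ⟨rfl, rfl, harrF⟩
      · rw [htie, if_neg hg, if_neg (fun hh => hg (by rw [heq, pairGt_eq] at hh; exact hh.2))]
        exact ⟨rfl, rfl, harrF⟩
    · rw [if_pos hgt, if_pos ⟨hcle, pairGt_gt _ _ hgt⟩]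
      exact ⟨rfl, rfl, harrF⟩

-- transporting bodyA_char through A's outer fold
theorem foldA (n : Int) (info : List Int) : ∀ (L : List Int), (∀ s ∈ L, 0 ≤ s) →
    ∀ (ans arr : List Int) (m : Int), ans.length = 11 → arr.length = 11 →
    (L.foldl (bodyA n info) (ans, arr, m)).1
      = (L.foldl (fun b s => uB n info b s.toNat) (m, ans)).2 ∧
    (L.foldl (bodyA n info) (ans, arr, m)).2.2
      = (L.foldl (fun b s => uB n info b s.toNat) (m, ans)).1 := by
  intro L
  induction L with
  | nil => intro _ ans arr m _ _; exact ⟨rfl, rfl⟩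
  | cons s L ih =>
    intro hL ans arr m ha hr
    have hs : 0 ≤ s := hL s (List.mem_cons_self ..)
    obtain ⟨c1, c2, c3⟩ := bodyA_char n info s hs ans arr m ha hr
    rw [List.foldl_cons, List.foldl_cons]
    have hb : bodyA n info (ans, arr, m) s
        = ((uB n info (m, ans) s.toNat).2, (bodyA n info (ans, arr, m) s).2.1,
           (uB n info (m, ans) s.toNat).1) := by
      rw [← c1, ← c2]
    rw [hb, show (uB n info (m, ans) s.toNat)
        = ((uB n info (m, ans) s.toNat).1, (uB n info (m, ans) s.toNat).2) from rfl]
    exact ih (fun x hx => hL x (List.mem_cons_of_mem _ hx))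
      _ _ _ (uB_len n info (m, ans) s.toNat ha) c3

-- ===== the bisimulation between A's fold (subsets 1..1023) and B's (0..1023) =====
def Rrel (a b : Int × List Int) : Prop :=
  a.1 = b.1 ∧ 0 ≤ a.1 ∧ (0 < a.1 → a.2 = b.2) ∧ a.2.length = 11 ∧ b.2.length = 11

theorem uB_step (n : Int) (info : List Int) (j : Nat) (a b : Int × List Int) (h : Rrel a b) :
    Rrel (uB n info a j) (uB n info b j) := by
  obtain ⟨h1, h2, h3, h4, h5⟩ := h
  unfold uB
  simp only [dfsB]
  set d := rbF 10 j - pbF info 10 j with hd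
  set c := cbF info 10 j with hcc
  set arr := tbF info 10 j ++ [n - c] with harr
  have hlarr : arr.length = 11 := by simp [harr, length_tbF]
  by_cases hcn : c ≤ n
  · rcases lt_trichotomy d a.1 with hlt | heq | hgt
    · rw [if_neg (by
          intro hh
          rw [pairGt_lt _ _ hlt] at hh
          cases hh.2),
        if_neg (by
          intro hh
          rw [pairGt_lt _ _ (by omega : d < b.1)] at hh
          cases hh.2)]
      exact ⟨h1, h2, h3, h4, h5⟩
    · by_cases hpos : 0 < a.1
      · have hab : a.2 = b.2 := h3 hpos
        by_cases hp : pairGt (d, arr.reverse) (b.1, b.2.reverse) = true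
        · rw [if_pos ⟨hcn, by rw [h1, hab]; exact hp⟩, if_pos ⟨hcn, hp⟩]
          exact ⟨rfl, by omega, fun _ => rfl, hlarr, hlarr⟩
        · rw [if_neg (fun hh => hp (by rw [← h1, ← hab]; exact hh.2)),
            if_neg (fun hh => hp hh.2)]
          exact ⟨h1, h2, h3, h4, h5⟩
      · have ha0 : a.1 = 0 := by omega
        have hd0 : d = 0 := by omega
        constructor
        · by_cases hpa : pairGt (d, arr.reverse) (a.1, a.2.reverse) = true <;>
          by_cases hpb : pairGt (d, arr.reverse) (b.1, b.2.reverse) = true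
          · rw [if_pos ⟨hcn, hpa⟩, if_pos ⟨hcn, hpb⟩]
          · rw [if_pos ⟨hcn, hpa⟩, if_neg (fun hh => hpb hh.2)]
            simp [hd0, ← h1, ha0]
          · rw [if_neg (fun hh => hpa hh.2), if_pos ⟨hcn, hpb⟩]
            simp [hd0, ha0]
          · rw [if_neg (fun hh => hpa hh.2), if_neg (fun hh => hpb hh.2)]
            exact h1
        refine ⟨?_, ?_, ?_, ?_⟩
        · by_cases hpa : pairGt (d, arr.reverse) (a.1, a.2.reverse) = true
          · rw [if_pos ⟨hcn, hpa⟩]; omega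
          · rw [if_neg (fun hh => hpa hh.2)]; omega
        · intro hposa
          exfalso
          revert hposa
          by_cases hpa : pairGt (d, arr.reverse) (a.1, a.2.reverse) = true
          · rw [if_pos ⟨hcn, hpa⟩]; omega
          · rw [if_neg (fun hh => hpa hh.2)]; omega
        · by_cases hpa : pairGt (d, arr.reverse) (a.1, a.2.reverse) = true
          · rw [if_pos ⟨hcn, hpa⟩]; exact hlarr
          · rw [if_neg (fun hh => hpa hh.2)]; exact h4
        · by_cases hpb : pairGt (d, arr.reverse) (b.1, b.2.reverse) = true
          · rw [if_pos ⟨hcn, hpb⟩]; exact hlarr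
          · rw [if_neg (fun hh => hpb hh.2)]; exact h5
    · rw [if_pos ⟨hcn, pairGt_gt _ _ hgt⟩, if_pos ⟨hcn, pairGt_gt _ _ (by omega : b.1 < d)⟩]
      exact ⟨rfl, by omega, fun _ => rfl, hlarr, hlarr⟩
  · rw [if_neg (fun hh => hcn hh.1), if_neg (fun hh => hcn hh.1)]
    exact ⟨h1, h2, h3, h4, h5⟩

theorem Rrel_fold (n : Int) (info : List Int) : ∀ (L : List Nat) (a b : Int × List Int), Rrel a b →
    Rrel (L.foldl (fun x j => uB n info x (1 + j)) a) (L.foldl (fun x j => uB n info x (1 + j)) b) := by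
  intro L
  induction L with
  | nil => intro a b h; exact h
  | cons j L ih =>
    intro a b h
    exact ih _ _ (uB_step n info (1 + j) a b h)

-- B's extra first subset (j = 0, Ryan takes nothing) keeps the running diff at 0
theorem uB_zero (n : Int) (info : List Int) :
    Rrel (0, List.replicate 11 (0 : Int)) (uB n info (0, List.replicate 11 0) 0) := by
  have hd : rbF 10 0 - pbF info 10 0 ≤ 0 := by
    have := pbF_nonneg info 10 0 (by omega)
    have := rbF_zero 10
    omega
  unfold uB
  simp only [dfsB]
  by_cases hcond : cbF info 10 0 ≤ n ∧ pairGt (rbF 10 0 - pbF info 10 0,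
      (tbF info 10 0 ++ [n - cbF info 10 0]).reverse) (0, (List.replicate 11 (0 : Int)).reverse) = true
  · rw [if_pos hcond]
    have h0 : rbF 10 0 - pbF info 10 0 = 0 := le_antisymm hd (pairGt_true_ge hcond.2)
    exact ⟨h0.symm, le_refl 0, fun hh => absurd hh (by omega), by simp, by simp [length_tbF]⟩
  · rw [if_neg hcond]
    exact ⟨rfl, le_refl 0, fun hh => absurd hh (by omega), by simp, by simp⟩

-- ===== assembling both programs into the common fold over subsets 1..1023 =====
theorem G_eq (n : Int) (info : List Int) :
    ((List.range 1023).map (fun k : Nat => (1 : Int) + k)).foldl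
        (fun b s => uB n info b s.toNat) (0, List.replicate 11 0)
    = (List.range 1023).foldl (fun x j => uB n info x (1 + j)) (0, List.replicate 11 0) := by
  rw [List.foldl_map]
  exact PySem.List.foldl_congr_mem _ _ _ _ (by
    intro acc k _
    show uB n info acc (((1 : Int) + (k : Nat)).toNat) = uB n info acc (1 + k)
    rw [show (((1 : Int) + ((k : Nat) : Int))).toNat = 1 + k from by omega])

theorem B_char (n : Int) (info : List Int) :
    dfsB n info 10 [] 0 0 0 (0, List.replicate 11 0)
    = (List.range 1023).foldl (fun x j => uB n info x (1 + j))
        (uB n info (0, List.replicate 11 0) 0) := by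
  rw [dfs_unroll]
  rw [PySem.List.foldl_congr_mem (List.range (2 ^ 10)) _
      (fun (b : Int × List Int) (j : Nat) => uB n info b j) _ (by
    intro acc j _
    simp [uB])]
  rw [show (2 ^ 10 : Nat) = 1 + 1023 from by norm_num, List.range_add, List.foldl_append,
    List.range_one, List.foldl_cons, List.foldl_nil, List.foldl_map]

theorem solFinish (a b : Int × List Int) (h : Rrel a b) :
    (if a.1 = 0 then [-1] else a.2) = (if b.1 > 0 then b.2 else ([-1] : List Int)) := by
  obtain ⟨e1, e2, e3, -, -⟩ := h
  by_cases h0 : a.1 = 0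
  · rw [if_pos h0, if_neg (by omega)]
  · rw [if_neg h0, if_pos (by omega)]
    exact e3 (by omega)

-- ===== VERDICT (by name: the statement is the Claim_ definition above) =====
theorem solution_spec : Claim_equal_solution := by
  intro n info _ _
  unfold Spec_solution solution solution_alt
  dsimp only
  rw [PySem.List.pyRange_one 1 1024, show ((1024 : Int) - 1).toNat = 1023 from by decide]
  have hmem : ∀ s ∈ (List.range 1023).map (fun k : Nat => (1 : Int) + k), 0 ≤ s := by
    intro s hsm
    obtain ⟨k, -, rfl⟩ := List.mem_map.mp hsm
    positivity
  obtain ⟨hA1, hA2⟩ := foldA n info _ hmem (List.replicate 11 0) (List.replicate 11 0) 0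
    (by simp) (by simp)
  rw [hA1, hA2, G_eq, B_char]
  exact solFinish _ _ (Rrel_fold n info (List.range 1023) _ _ (uB_zero n info))
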